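-- pv_equiv track=rewrite | github.com/shreya300033/deep-research | DRR/reasoning_engine.py | _generate_sub_questions
-- ===== SOURCE A (Python) =====
-- from typing import List, Dict, Any, Optional, Tuple, Union
--
-- def _generate_sub_questions(query: str) -> List[str]:
--
--     """Generate sub-questions from a complex query"""
--
--     # Simple rule-based decomposition
--
--     sub_questions = []
--
--
--
--     # Extract key concepts
--
--     words = query.lower().split()
--
--
--
--     # Look for comparison indicators
--
--     if any(word in words for word in ["compare", "versus", "vs", "difference", "similarity"]):
--
--         sub_questions.append(f"What are the key characteristics of the first concept in: {query}")
--
--         sub_questions.append(f"What are the key characteristics of the second concept in: {query}")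
--
--         sub_questions.append(f"What are the main differences and similarities in: {query}")
--
--
--
--     # Look for causal relationships
--
--     elif any(word in words for word in ["why", "how", "cause", "effect", "because"]):
--
--         sub_questions.append(f"What are the underlying causes in: {query}")
--
--         sub_questions.append(f"What are the effects and consequences in: {query}")
--
--         sub_questions.append(f"What is the relationship between cause and effect in: {query}")
--
--
--
--     # Look for temporal aspects
--
--     elif any(word in words for word in ["when", "time", "history", "evolution", "development"]):
--
--         sub_questions.append(f"What is the historical context of: {query}")
--
--         sub_questions.append(f"How has this evolved over time: {query}")
--
--         sub_questions.append(f"What are the current trends in: {query}")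
--
--
--
--     # Default decomposition
--
--     else:
--
--         sub_questions.append(f"What is the main topic of: {query}")
--
--         sub_questions.append(f"What are the key aspects of: {query}")
--
--         sub_questions.append(f"What are the important details about: {query}")
--
--
--
--     return sub_questions
-- ===== SOURCE B (Python) =====
-- _PRIO = {
--     "compare": 0, "versus": 0, "vs": 0, "difference": 0, "similarity": 0,
--     "why": 1, "how": 1, "cause": 1, "effect": 1, "because": 1,
--     "when": 2, "time": 2, "history": 2, "evolution": 2, "development": 2,
-- }
--
-- _TEMPLATES = [
--     ["What are the key characteristics of the first concept in: ",
--      "What are the key characteristics of the second concept in: ",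
--      "What are the main differences and similarities in: "],
--     ["What are the underlying causes in: ",
--      "What are the effects and consequences in: ",
--      "What is the relationship between cause and effect in: "],
--     ["What is the historical context of: ",
--      "How has this evolved over time: ",
--      "What are the current trends in: "],
--     ["What is the main topic of: ",
--      "What are the key aspects of: ",
--      "What are the important details about: "],
-- ]
--
--
-- def _generate_sub_questions(query: str):
--     """Generate sub-questions: one pass over the words taking the best
--     (minimal) category priority from a keyword->priority map."""
--     best = 3
--     for w in query.lower().split():
--         best = min(best, _PRIO.get(w, 3))
--     return [t + query for t in _TEMPLATES[best]]
-- ===== Notes on version B (the rewrite author's own statement) =====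
-- stated objective: alternative
-- what changed: Replaces A's staged any-membership tests over three keyword groups by a single pass over the query's words that folds a minimum category priority taken from a keyword-to-priority dictionary, then indexes a template table with that priority.
import Mathlib
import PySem

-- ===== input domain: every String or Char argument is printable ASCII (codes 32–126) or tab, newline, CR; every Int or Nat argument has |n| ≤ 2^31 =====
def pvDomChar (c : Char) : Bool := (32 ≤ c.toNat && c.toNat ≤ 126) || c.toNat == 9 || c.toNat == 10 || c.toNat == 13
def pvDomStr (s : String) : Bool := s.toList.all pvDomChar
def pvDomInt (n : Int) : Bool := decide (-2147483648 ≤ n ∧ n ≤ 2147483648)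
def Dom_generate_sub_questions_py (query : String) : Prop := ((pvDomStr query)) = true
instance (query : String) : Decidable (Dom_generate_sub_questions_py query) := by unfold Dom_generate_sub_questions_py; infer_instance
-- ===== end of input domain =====

-- B changes the algorithm: a single fold over the words taking the minimal keyword priority,
-- then a template-table lookup, instead of A's staged keyword-group membership tests.

-- ===== PORT A =====
-- A: if/elif cascade over keyword membership in the lower-cased split words.
def generate_sub_questions_py (query : String) : List String :=
  let words := PySem.Str.split₀ (PySem.Str.lower query)
  if (["compare", "versus", "vs", "difference", "similarity"].any (fun w => words.contains w)) then
    ["What are the key characteristics of the first concept in: " ++ query,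
     "What are the key characteristics of the second concept in: " ++ query,
     "What are the main differences and similarities in: " ++ query]
  else if (["why", "how", "cause", "effect", "because"].any (fun w => words.contains w)) then
    ["What are the underlying causes in: " ++ query,
     "What are the effects and consequences in: " ++ query,
     "What is the relationship between cause and effect in: " ++ query]
  else if (["when", "time", "history", "evolution", "development"].any (fun w => words.contains w)) then
    ["What is the historical context of: " ++ query,
     "How has this evolved over time: " ++ query,
     "What are the current trends in: " ++ query]
  else
    ["What is the main topic of: " ++ query,
     "What are the key aspects of: " ++ query,
     "What are the important details about: " ++ query]

-- ===== PORT B =====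
-- B: word -> priority dictionary; one fold over the words keeps the minimal priority;
-- the priority indexes the template table.
def pvPrio : PySem.Dict String Nat :=
  PySem.Dict.ofList
    [("compare", 0), ("versus", 0), ("vs", 0), ("difference", 0), ("similarity", 0),
     ("why", 1), ("how", 1), ("cause", 1), ("effect", 1), ("because", 1),
     ("when", 2), ("time", 2), ("history", 2), ("evolution", 2), ("development", 2)]

def pvTemplates : List (List String) :=
  [["What are the key characteristics of the first concept in: ",
    "What are the key characteristics of the second concept in: ",
    "What are the main differences and similarities in: "],
   ["What are the underlying causes in: ",
    "What are the effects and consequences in: ",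
    "What is the relationship between cause and effect in: "],
   ["What is the historical context of: ",
    "How has this evolved over time: ",
    "What are the current trends in: "],
   ["What is the main topic of: ",
    "What are the key aspects of: ",
    "What are the important details about: "]]

def generate_sub_questions_py_alt (query : String) : List String :=
  let words := PySem.Str.split₀ (PySem.Str.lower query)
  let best := words.foldl (fun b w => min b (pvPrio.getD w 3)) 3
  (pvTemplates.getD best []).map (fun t => t ++ query)

-- ===== PRECONDITION & SPEC =====
def Spec_generate_sub_questions_py (query : String) (out : List String) : Prop := out = generate_sub_questions_py_alt query
instance (query : String) (out : List String) : Decidable (Spec_generate_sub_questions_py query out) := by unfold Spec_generate_sub_questions_py; infer_instance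

-- ===== CLAIM (what is proved, stated in full; the proofs are below) =====
def Claim_equal_generate_sub_questions_py : Prop := ∀ (query : String), Dom_generate_sub_questions_py query → Spec_generate_sub_questions_py query (generate_sub_questions_py query)

-- ===== LEMMAS AND PROOFS =====

theorem pvPrio_items : pvPrio.items =
    [("compare", 0), ("versus", 0), ("vs", 0), ("difference", 0), ("similarity", 0),
     ("why", 1), ("how", 1), ("cause", 1), ("effect", 1), ("because", 1),
     ("when", 2), ("time", 2), ("history", 2), ("evolution", 2), ("development", 2)] := by rfl

theorem pvPrio_mem0 (w : String)
    (h : w ∈ ["compare", "versus", "vs", "difference", "similarity"]) :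
    pvPrio.getD w 3 = 0 := by
  fin_cases h <;> rfl

theorem pvPrio_mem1 (w : String)
    (h : w ∈ ["why", "how", "cause", "effect", "because"]) :
    pvPrio.getD w 3 = 1 := by
  fin_cases h <;> rfl

theorem pvPrio_mem2 (w : String)
    (h : w ∈ ["when", "time", "history", "evolution", "development"]) :
    pvPrio.getD w 3 = 2 := by
  fin_cases h <;> rfl

theorem pvPrio_ge1 (w : String)
    (h : w ∉ ["compare", "versus", "vs", "difference", "similarity"]) :
    1 ≤ pvPrio.getD w 3 := by
  cases hv : pvPrio.get? w with
  | none => rw [PySem.Dict.getD_of_get?_eq_none _ _ hv]; norm_num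
  | some v =>
    have hm := PySem.Dict.mem_items_of_get?_eq_some _ hv
    rw [pvPrio_items] at hm
    rw [PySem.Dict.getD_of_get?_eq_some _ _ hv]
    simp only [List.mem_cons, List.not_mem_nil, or_false, Prod.mk.injEq] at hm
    rcases hm with ⟨hw, rfl⟩|⟨hw, rfl⟩|⟨hw, rfl⟩|⟨hw, rfl⟩|⟨hw, rfl⟩|⟨_, rfl⟩|⟨_, rfl⟩|⟨_, rfl⟩|⟨_, rfl⟩|⟨_, rfl⟩|⟨_, rfl⟩|⟨_, rfl⟩|⟨_, rfl⟩|⟨_, rfl⟩|⟨_, rfl⟩ <;> simp_all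

theorem pvPrio_ge2 (w : String)
    (h1 : w ∉ ["compare", "versus", "vs", "difference", "similarity"])
    (h2 : w ∉ ["why", "how", "cause", "effect", "because"]) :
    2 ≤ pvPrio.getD w 3 := by
  cases hv : pvPrio.get? w with
  | none => rw [PySem.Dict.getD_of_get?_eq_none _ _ hv]; norm_num
  | some v =>
    have hm := PySem.Dict.mem_items_of_get?_eq_some _ hv
    rw [pvPrio_items] at hm
    rw [PySem.Dict.getD_of_get?_eq_some _ _ hv]
    simp only [List.mem_cons, List.not_mem_nil, or_false, Prod.mk.injEq] at hm
    rcases hm with ⟨hw, rfl⟩|⟨hw, rfl⟩|⟨hw, rfl⟩|⟨hw, rfl⟩|⟨hw, rfl⟩|⟨hw, rfl⟩|⟨hw, rfl⟩|⟨hw, rfl⟩|⟨hw, rfl⟩|⟨hw, rfl⟩|⟨_, rfl⟩|⟨_, rfl⟩|⟨_, rfl⟩|⟨_, rfl⟩|⟨_, rfl⟩ <;> simp_all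

theorem pvPrio_ge3 (w : String)
    (h1 : w ∉ ["compare", "versus", "vs", "difference", "similarity"])
    (h2 : w ∉ ["why", "how", "cause", "effect", "because"])
    (h3 : w ∉ ["when", "time", "history", "evolution", "development"]) :
    pvPrio.getD w 3 = 3 := by
  cases hv : pvPrio.get? w with
  | none => rw [PySem.Dict.getD_of_get?_eq_none _ _ hv]
  | some v =>
    have hm := PySem.Dict.mem_items_of_get?_eq_some _ hv
    rw [pvPrio_items] at hm
    rw [PySem.Dict.getD_of_get?_eq_some _ _ hv]
    simp only [List.mem_cons, List.not_mem_nil, or_false, Prod.mk.injEq] at hm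
    rcases hm with ⟨hw, rfl⟩|⟨hw, rfl⟩|⟨hw, rfl⟩|⟨hw, rfl⟩|⟨hw, rfl⟩|⟨hw, rfl⟩|⟨hw, rfl⟩|⟨hw, rfl⟩|⟨hw, rfl⟩|⟨hw, rfl⟩|⟨hw, rfl⟩|⟨hw, rfl⟩|⟨hw, rfl⟩|⟨hw, rfl⟩|⟨hw, rfl⟩ <;> simp_all

theorem pvFold_le_init (l : List String) : ∀ (i : Nat),
    l.foldl (fun b w => min b (pvPrio.getD w 3)) i ≤ i := by
  induction l with
  | nil => intro i; simp
  | cons a l ih =>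
    intro i
    simp only [List.foldl_cons]
    exact le_trans (ih _) (Nat.min_le_left _ _)

theorem pvFold_le_mem (l : List String) : ∀ (i : Nat) (w : String), w ∈ l →
    l.foldl (fun b w => min b (pvPrio.getD w 3)) i ≤ pvPrio.getD w 3 := by
  induction l with
  | nil => intro i w hw; cases hw
  | cons a l ih =>
    intro i w hw
    simp only [List.foldl_cons]
    rcases List.mem_cons.mp hw with h | h
    · subst h; exact le_trans (pvFold_le_init l _) (Nat.min_le_right _ _)
    · exact ih _ w h

theorem pvFold_ge (l : List String) : ∀ (i k : Nat), k ≤ i →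
    (∀ w ∈ l, k ≤ pvPrio.getD w 3) →
    k ≤ l.foldl (fun b w => min b (pvPrio.getD w 3)) i := by
  induction l with
  | nil => intro i k hi _; simpa using hi
  | cons a l ih =>
    intro i k hi h
    simp only [List.foldl_cons]
    exact ih _ _ (le_min hi (h a List.mem_cons_self))
      (fun w hw => h w (List.mem_cons_of_mem _ hw))

-- ===== VERDICT (by name: the statement is the Claim_ definition above) =====
theorem generate_sub_questions_py_spec : Claim_equal_generate_sub_questions_py := by
  intro query _
  unfold Spec_generate_sub_questions_py generate_sub_questions_py generate_sub_questions_py_alt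
  set words := PySem.Str.split₀ (PySem.Str.lower query) with hwords
  dsimp only
  split_ifs with h1 h2 h3
  · -- comparison branch: some word has priority 0
    simp only [List.any_eq_true, List.contains_iff_mem] at h1
    obtain ⟨k, hk, hkw⟩ := h1
    have hb : words.foldl (fun b w => min b (pvPrio.getD w 3)) 3 = 0 :=
      Nat.le_zero.mp (le_trans (pvFold_le_mem words 3 k hkw) (le_of_eq (pvPrio_mem0 k hk)))
    rw [hb]; rfl
  · -- causal branch
    simp only [List.any_eq_true, List.contains_iff_mem, not_exists, not_and] at h1
    simp only [List.any_eq_true, List.contains_iff_mem] at h2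
    obtain ⟨k, hk, hkw⟩ := h2
    have hle : words.foldl (fun b w => min b (pvPrio.getD w 3)) 3 ≤ 1 :=
      le_trans (pvFold_le_mem words 3 k hkw) (le_of_eq (pvPrio_mem1 k hk))
    have hge : 1 ≤ words.foldl (fun b w => min b (pvPrio.getD w 3)) 3 :=
      pvFold_ge words 3 1 (by norm_num)
        (fun w hw => pvPrio_ge1 w (fun hmem => h1 w hmem hw))
    have hb : words.foldl (fun b w => min b (pvPrio.getD w 3)) 3 = 1 := le_antisymm hle hge
    rw [hb]; rfl
  · -- temporal branch
    simp only [List.any_eq_true, List.contains_iff_mem, not_exists, not_and] at h1 h2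
    simp only [List.any_eq_true, List.contains_iff_mem] at h3
    obtain ⟨k, hk, hkw⟩ := h3
    have hle : words.foldl (fun b w => min b (pvPrio.getD w 3)) 3 ≤ 2 :=
      le_trans (pvFold_le_mem words 3 k hkw) (le_of_eq (pvPrio_mem2 k hk))
    have hge : 2 ≤ words.foldl (fun b w => min b (pvPrio.getD w 3)) 3 :=
      pvFold_ge words 3 2 (by norm_num)
        (fun w hw => pvPrio_ge2 w (fun hmem => h1 w hmem hw) (fun hmem => h2 w hmem hw))
    have hb : words.foldl (fun b w => min b (pvPrio.getD w 3)) 3 = 2 := le_antisymm hle hge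
    rw [hb]; rfl
  · -- default branch
    simp only [List.any_eq_true, List.contains_iff_mem, not_exists, not_and] at h1 h2 h3
    have hle : words.foldl (fun b w => min b (pvPrio.getD w 3)) 3 ≤ 3 := pvFold_le_init _ _
    have hge : 3 ≤ words.foldl (fun b w => min b (pvPrio.getD w 3)) 3 :=
      pvFold_ge words 3 3 (le_refl _)
        (fun w hw => le_of_eq (pvPrio_ge3 w (fun hm => h1 w hm hw)
          (fun hm => h2 w hm hw) (fun hm => h3 w hm hw)).symm)
    have hb : words.foldl (fun b w => min b (pvPrio.getD w 3)) 3 = 3 := le_antisymm hle hge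
    rw [hb]; rfl
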